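-- pv_equiv track=rewrite | github.com/hzjy2025/nonintrusive25 | utils/Generate_lid_data.py | get_inter_2d_inx
-- ===== SOURCE A (Python) =====
-- def get_inter_2d_inx(Nx,Ny):
--
--     Nh_list = [i for i in range(Nx*Ny)]
--
--     # Boundary
--
--     Nh_list_bc1 = Nh_list[Ny-1::Ny]  # top
--     Nh_list_bc21 = Nh_list[(Nx-1)*Ny:]  # right
--     Nh_list_bc22 = Nh_list[0::Ny]  # bottom
--     Nh_list_bc23 = Nh_list[0:Ny]   # left
--
--
--     # Inter
--
--     Nh_list_in = [x for x in Nh_list if x not in Nh_list_bc1]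
--     Nh_list_in = [x for x in Nh_list_in if x not in Nh_list_bc21]
--     Nh_list_in = [x for x in Nh_list_in if x not in Nh_list_bc22]
--     Nh_list_in = [x for x in Nh_list_in if x not in Nh_list_bc23]
--
--     return Nh_list_bc1, Nh_list_bc21, Nh_list_bc22, Nh_list_bc23, Nh_list_in
-- ===== SOURCE B (Python) =====
-- def get_inter_2d_inx(Nx, Ny):
--
--     # Every list is generated directly from grid coordinates (row i, column j of the
--     # Nx-by-Ny grid, cell index i*Ny + j) -- no index list, no slicing, no filtering.
--
--     if Nx > 0 and Ny > 0:
--         Nh_list_bc1 = [i * Ny + Ny - 1 for i in range(Nx)]    # top    (j = Ny-1)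
--         Nh_list_bc21 = list(range((Nx - 1) * Ny, Nx * Ny))    # right  (i = Nx-1)
--         Nh_list_bc22 = [i * Ny for i in range(Nx)]            # bottom (j = 0)
--         Nh_list_bc23 = list(range(Ny))                        # left   (i = 0)
--         if Nx > 2 and Ny > 2:
--             Nh_list_in = [i * Ny + j for i in range(1, Nx - 1) for j in range(1, Ny - 1)]
--         else:
--             Nh_list_in = []   # a grid with fewer than 3 rows or columns has no interior
--         return Nh_list_bc1, Nh_list_bc21, Nh_list_bc22, Nh_list_bc23, Nh_list_in
--     return [], [], [], [], []
-- ===== Notes on version B (the rewrite author's own statement) =====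
-- stated objective: faster
-- what changed: All five lists are generated directly from grid coordinates ((i,j) -> i*Ny+j arithmetic ranges) instead of building the full index list, slicing it four times and filtering it through four successive membership scans against the boundary lists.
-- intended difference: For negative grid dimensions Nx<0 and Ny<0 the negative-step slices make A return nonempty boundary/interior lists for a nonexistent grid; B returns five empty lists, the intended value for an empty grid. — e.g. on get_inter_2d_inx(-1, -1): A returns ([], [], [0], [], []), B returns ([], [], [], [], [])
import Mathlib
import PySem

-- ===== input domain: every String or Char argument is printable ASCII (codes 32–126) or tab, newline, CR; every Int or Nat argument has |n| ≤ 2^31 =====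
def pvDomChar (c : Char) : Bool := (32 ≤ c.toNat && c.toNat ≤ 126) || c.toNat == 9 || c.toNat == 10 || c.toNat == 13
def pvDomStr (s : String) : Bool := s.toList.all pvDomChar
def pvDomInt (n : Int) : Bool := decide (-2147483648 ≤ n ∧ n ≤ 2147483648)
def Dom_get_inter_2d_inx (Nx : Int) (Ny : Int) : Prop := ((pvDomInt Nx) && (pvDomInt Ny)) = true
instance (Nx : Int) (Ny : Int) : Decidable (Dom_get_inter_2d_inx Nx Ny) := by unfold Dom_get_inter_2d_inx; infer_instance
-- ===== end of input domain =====

-- B generates all five lists directly from grid coordinates ((i,j) ↦ i*Ny+j arithmetic ranges)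
-- instead of slicing a full index list and filtering it through four membership scans.

-- ===== PORT A =====
def get_inter_2d_inx (Nx : Int) (Ny : Int) : List Int × List Int × List Int × List Int × List Int :=
  let Nh_list := PySem.List.pyRange 0 (Nx * Ny) 1
  -- boundary slices; the stepped slices raise ValueError iff Ny = 0, excluded by Pre_
  let bc1 := (PySem.List.slice? Nh_list (some (Ny - 1)) none Ny).getD []
  let bc21 := PySem.List.slice Nh_list (some ((Nx - 1) * Ny)) none
  let bc22 := (PySem.List.slice? Nh_list (some 0) none Ny).getD []
  let bc23 := PySem.List.slice Nh_list (some 0) (some Ny)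
  -- four successive filtering passes, as in A
  let inn := Nh_list.filter (fun x => !(bc1.contains x))
  let inn := inn.filter (fun x => !(bc21.contains x))
  let inn := inn.filter (fun x => !(bc22.contains x))
  let inn := inn.filter (fun x => !(bc23.contains x))
  (bc1, bc21, bc22, bc23, inn)

-- ===== PORT B =====
def get_inter_2d_inx_alt (Nx : Int) (Ny : Int) : List Int × List Int × List Int × List Int × List Int :=
  if 0 < Nx ∧ 0 < Ny then
    let bc1 := (PySem.List.pyRange 0 Nx 1).map (fun i => i * Ny + Ny - 1)
    let bc21 := PySem.List.pyRange ((Nx - 1) * Ny) (Nx * Ny) 1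
    let bc22 := (PySem.List.pyRange 0 Nx 1).map (fun i => i * Ny)
    let bc23 := PySem.List.pyRange 0 Ny 1
    let inn := if 2 < Nx ∧ 2 < Ny then
        (PySem.List.pyRange 1 (Nx - 1) 1).flatMap
          (fun i => (PySem.List.pyRange 1 (Ny - 1) 1).map (fun j => i * Ny + j))
      else []
    (bc1, bc21, bc22, bc23, inn)
  else ([], [], [], [], [])

-- ===== PRECONDITION & SPEC =====
-- Pre_ excludes exactly Ny = 0, where A's stepped slices raise ValueError (slice step cannot be zero).
def Pre_get_inter_2d_inx (Nx : Int) (Ny : Int) : Prop := Ny ≠ 0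
instance (Nx : Int) (Ny : Int) : Decidable (Pre_get_inter_2d_inx Nx Ny) := by unfold Pre_get_inter_2d_inx; infer_instance
def pvWitness_get_inter_2d_inx : Int × Int := (4, 3)

-- For Nx < 0 and Ny < 0 the negative-step slices make A return nonempty boundary/interior lists
-- for a nonexistent grid; B returns five empty lists, the intended value for an empty grid.
def D_get_inter_2d_inx (Nx : Int) (Ny : Int) : Prop := Nx < 0 ∧ Ny < 0
instance (Nx : Int) (Ny : Int) : Decidable (D_get_inter_2d_inx Nx Ny) := by unfold D_get_inter_2d_inx; infer_instance

def Spec_get_inter_2d_inx (Nx : Int) (Ny : Int) (out : List Int × List Int × List Int × List Int × List Int) : Prop := ¬ D_get_inter_2d_inx Nx Ny → out = get_inter_2d_inx_alt Nx Ny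
instance (Nx : Int) (Ny : Int) (out : List Int × List Int × List Int × List Int × List Int) : Decidable (Spec_get_inter_2d_inx Nx Ny out) := by unfold Spec_get_inter_2d_inx; infer_instance

def pvDiffWitness_get_inter_2d_inx : Int × Int := (-1, -1)
def pvDiffWitnessOut_get_inter_2d_inx : (List Int × List Int × List Int × List Int × List Int) × (List Int × List Int × List Int × List Int × List Int) :=
  (([], [], [0], [], []), ([], [], [], [], []))

-- ===== CLAIM (what is proved, stated in full; the proofs are below) =====
def Claim_unchanged_get_inter_2d_inx : Prop := ∀ (Nx : Int) (Ny : Int), Dom_get_inter_2d_inx Nx Ny → Pre_get_inter_2d_inx Nx Ny → Spec_get_inter_2d_inx Nx Ny (get_inter_2d_inx Nx Ny)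
def Claim_changed_get_inter_2d_inx : Prop := Dom_get_inter_2d_inx (pvDiffWitness_get_inter_2d_inx.1) (pvDiffWitness_get_inter_2d_inx.2) ∧ Pre_get_inter_2d_inx (pvDiffWitness_get_inter_2d_inx.1) (pvDiffWitness_get_inter_2d_inx.2) ∧ D_get_inter_2d_inx (pvDiffWitness_get_inter_2d_inx.1) (pvDiffWitness_get_inter_2d_inx.2) ∧ get_inter_2d_inx (pvDiffWitness_get_inter_2d_inx.1) (pvDiffWitness_get_inter_2d_inx.2) = pvDiffWitnessOut_get_inter_2d_inx.1 ∧ get_inter_2d_inx_alt (pvDiffWitness_get_inter_2d_inx.1) (pvDiffWitness_get_inter_2d_inx.2) = pvDiffWitnessOut_get_inter_2d_inx.2 ∧ pvDiffWitnessOut_get_inter_2d_inx.1 ≠ pvDiffWitnessOut_get_inter_2d_inx.2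
def Claim_exact_get_inter_2d_inx : Prop := ∀ (Nx : Int) (Ny : Int), Dom_get_inter_2d_inx Nx Ny → Pre_get_inter_2d_inx Nx Ny → D_get_inter_2d_inx Nx Ny → get_inter_2d_inx Nx Ny ≠ get_inter_2d_inx_alt Nx Ny

-- ===== LEMMAS AND PROOFS =====

-- membership in xs[s::st] for xs = range(0,N), 0 < st, 0 ≤ s
theorem mem_slice_step (N s st x : Int) (hst : 0 < st) (hs : 0 ≤ s) :
    x ∈ (PySem.List.slice? (PySem.List.pyRange 0 N 1) (some s) none st).getD [] ↔
      s ≤ x ∧ x < N ∧ st ∣ (x - s) := by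
  have hst0 : st ≠ 0 := by omega
  have hnlt : ¬ st < 0 := by omega
  have hns : ¬ s < 0 := by omega
  simp only [PySem.List.slice?, PySem.List.sliceIndices, if_neg hst0, if_neg hnlt,
    if_pos hst, Option.getD_some, PySem.List.length_pyRange_one, if_neg hns,
    List.mem_filterMap, List.mem_range, sub_zero]
  by_cases hN : N ≤ 0
  · have h0 : N.toNat = 0 := by omega
    rw [h0]
    simp only [Nat.cast_zero]
    rw [min_eq_right hs]
    simp only [lt_irrefl, if_false]
    omega
  · push Not at hN
    have hcast : ((N.toNat : Int)) = N := by omega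
    rw [hcast]
    by_cases hsN : s < N
    · rw [min_eq_left (by omega), if_pos hsN]
      constructor
      · rintro ⟨k, hk, hg⟩
        rw [PySem.List.getElem?_pyRange_one] at hg
        split at hg
        · rename_i hlt
          obtain rfl : x = 0 + ((s + st * k).toNat : Int) := by injection hg; omega
          have hnn : 0 ≤ s + st * (k:Int) := by positivity
          have hc : ((s + st * (k:Int)).toNat : Int) = s + st * k := by omega
          rw [zero_add, hc]
          refine ⟨by nlinarith, by omega, ⟨k, by ring⟩⟩
        · exact absurd hg (by simp)
      · rintro ⟨h1, h2, ⟨k, hk⟩⟩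
        have hk0 : 0 ≤ k := by nlinarith
        refine ⟨k.toNat, ?_, ?_⟩
        · have e1 : N - s + st - 1 = (N - s - 1) + 1 * st := by ring
          have e2 : (N - s + st - 1) / st = (N - s - 1)/st + 1 := by
            rw [e1, Int.add_mul_ediv_right _ _ hst0]
          have hkle : k ≤ (N - s - 1)/st := by
            rw [Int.le_ediv_iff_mul_le hst]
            nlinarith
          omega
        · rw [PySem.List.getElem?_pyRange_one]
          have hc : ((s + st * (k.toNat:Int)).toNat : Int) = x := by
            have : (k.toNat : Int) = k := by omega
            rw [this]; omega
          rw [if_pos (by omega), zero_add, hc]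
    · rw [min_eq_right (by omega), if_neg (by omega)]
      constructor
      · rintro ⟨a, ha, _⟩; omega
      · rintro ⟨h1, h2, _⟩; omega

-- xs[s::st] for xs = range(0,N), 0 < st, 0 ≤ s < st ≤ N with st ∣ N, as the explicit list
theorem slice_step_eq (Nx Ny s : Int) (hNx : 0 < Nx) (hNy : 0 < Ny)
    (hs : 0 ≤ s) (hsN : s < Ny) :
    (PySem.List.slice? (PySem.List.pyRange 0 (Nx * Ny) 1) (some s) none Ny).getD []
      = (PySem.List.pyRange 0 Nx 1).map (fun i => i * Ny + s) := by
  have hst0 : Ny ≠ 0 := by omega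
  have hnlt : ¬ Ny < 0 := by omega
  have hns : ¬ s < 0 := by omega
  have hNyN : Ny ≤ Nx * Ny := by nlinarith
  have hNN : (0:Int) < Nx * Ny := by positivity
  have hcast : (((Nx * Ny).toNat : Int)) = Nx * Ny := by omega
  simp only [PySem.List.slice?, PySem.List.sliceIndices, if_neg hst0, if_neg hnlt,
    if_pos hNy, Option.getD_some, PySem.List.length_pyRange_one, if_neg hns, sub_zero]
  rw [hcast, min_eq_left (by omega), if_pos (by omega)]
  have hcount : (Nx * Ny - s + Ny - 1) / Ny = Nx := by
    have e1 : Nx * Ny - s + Ny - 1 = (Ny - s - 1) + Nx * Ny := by ring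
    rw [e1, Int.add_mul_ediv_right _ _ hst0, Int.ediv_eq_zero_of_lt (by omega) (by omega),
      zero_add]
  rw [hcount]
  have hmap : ∀ k ∈ List.range Nx.toNat,
      (PySem.List.pyRange 0 (Nx * Ny) 1)[(s + Ny * (k:Int)).toNat]? = some (s + Ny * (k:Int)) := by
    intro k hk
    rw [List.mem_range] at hk
    have hkx : (k : Int) < Nx := by omega
    have hub : s + Ny * (k:Int) ≤ Nx * Ny - 1 := by nlinarith
    have hnn : 0 ≤ Ny * (k:Int) := mul_nonneg (by omega) (by omega)
    rw [PySem.List.getElem?_pyRange_one, if_pos (by omega), zero_add]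
    congr 1
    omega
  rw [List.filterMap_congr hmap,
    show (fun k : Nat => some (s + Ny * (k:Int))) = some ∘ (fun k : Nat => s + Ny * (k:Int)) from rfl,
    List.filterMap_eq_map, PySem.List.pyRange_one]
  simp only [List.map_map, sub_zero]
  exact List.map_congr_left (fun k _ => by simp; ring)

theorem mem_drop_pyRange (N a x : Int) (ha : 0 ≤ a) :
    x ∈ (PySem.List.pyRange 0 N 1).drop a.toNat ↔ a ≤ x ∧ x < N := by
  by_cases haN : a ≤ N
  · have hsplit := PySem.List.pyRange_one_append 0 a N ha haN
    have hl : (PySem.List.pyRange 0 a 1).length = a.toNat := by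
      rw [PySem.List.length_pyRange_one]; omega
    rw [hsplit, ← hl, List.drop_left, PySem.List.mem_pyRange_one]
  · rw [List.drop_eq_nil_of_le (by rw [PySem.List.length_pyRange_one]; omega)]
    simp only [List.not_mem_nil, false_iff]; omega

theorem mem_take_pyRange (N a x : Int) (ha : 0 ≤ a) :
    x ∈ (PySem.List.pyRange 0 N 1).take a.toNat ↔ 0 ≤ x ∧ x < min a N := by
  by_cases haN : a ≤ N
  · have hsplit := PySem.List.pyRange_one_append 0 a N ha haN
    have hl : (PySem.List.pyRange 0 a 1).length = a.toNat := by
      rw [PySem.List.length_pyRange_one]; omega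
    rw [hsplit, ← hl, List.take_left, PySem.List.mem_pyRange_one]
    omega
  · rw [List.take_of_length_le (by rw [PySem.List.length_pyRange_one]; omega),
      PySem.List.mem_pyRange_one]
    omega

-- xs[a:] for xs = range(0,N), 0 ≤ a ≤ N, as the explicit range
theorem drop_pyRange_eq (N a : Int) (ha : 0 ≤ a) (haN : a ≤ N) :
    PySem.List.slice (PySem.List.pyRange 0 N 1) (some a) none = PySem.List.pyRange a N 1 := by
  rw [PySem.List.slice_from _ ha]
  have hsplit := PySem.List.pyRange_one_append 0 a N ha haN
  have hl : (PySem.List.pyRange 0 a 1).length = a.toNat := by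
    rw [PySem.List.length_pyRange_one]; omega
  rw [hsplit, ← hl, List.drop_left]

-- xs[0:b] for xs = range(0,N), 0 ≤ b ≤ N, as the explicit range
theorem take_pyRange_eq (N b : Int) (hb : 0 ≤ b) (hbN : b ≤ N) :
    PySem.List.slice (PySem.List.pyRange 0 N 1) (some 0) (some b) = PySem.List.pyRange 0 b 1 := by
  rw [PySem.List.slice_zero_start, PySem.List.slice_to _ hb]
  have hsplit := PySem.List.pyRange_one_append 0 b N hb hbN
  have hl : (PySem.List.pyRange 0 b 1).length = b.toNat := by
    rw [PySem.List.length_pyRange_one]; omega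
  rw [hsplit, ← hl, List.take_left]

-- the arithmetic heart: x survives all four boundary filters iff x = i*Ny + j for interior (i,j)
theorem interior_mem_iff (Nx Ny x : Int) (hNx : 1 ≤ Nx) (hNy : 1 ≤ Ny) :
    ((0 ≤ x ∧ x < Nx * Ny) ∧
      ¬(Ny - 1 ≤ x ∧ x < Nx * Ny ∧ Ny ∣ (x - (Ny - 1))) ∧
      ¬((Nx - 1) * Ny ≤ x ∧ x < Nx * Ny) ∧
      ¬(0 ≤ x ∧ x < Nx * Ny ∧ Ny ∣ x) ∧
      ¬(0 ≤ x ∧ x < min Ny (Nx * Ny)))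
    ↔ ∃ i, (1 ≤ i ∧ i < Nx - 1) ∧ ∃ j, (1 ≤ j ∧ j < Ny - 1) ∧ x = i * Ny + j := by
  have hNy0 : (0:Int) < Ny := by omega
  constructor
  · rintro ⟨⟨hx0, hxN⟩, h1, h2, h3, h4⟩
    have hNyx : Ny ≤ x := by
      rcases le_total Ny (Nx * Ny) with h | h
      · by_contra hc
        exact h4 ⟨hx0, by rw [min_eq_left h]; omega⟩
      · by_contra hc
        exact h4 ⟨hx0, by rw [min_eq_right h]; omega⟩
    have hM : x < (Nx - 1) * Ny := by
      by_contra hc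
      exact h2 ⟨by omega, hxN⟩
    have hnd : ¬ Ny ∣ x := fun hd => h3 ⟨hx0, hxN, hd⟩
    have hnd1 : ¬ Ny ∣ (x - (Ny - 1)) := fun hd => h1 ⟨by omega, hxN, hd⟩
    have key : Ny * (x / Ny) + x % Ny = x := Int.mul_ediv_add_emod x Ny
    have hm0 : 0 ≤ x % Ny := Int.emod_nonneg x (by omega)
    have hmlt : x % Ny < Ny := Int.emod_lt_of_pos x hNy0
    refine ⟨x / Ny, ⟨?_, ?_⟩, x % Ny, ⟨?_, ?_⟩, ?_⟩
    · have := (Int.le_ediv_iff_mul_le hNy0 (a := 1) (b := x)).mpr (by omega)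
      omega
    · exact (Int.ediv_lt_iff_lt_mul hNy0).mpr (by linarith [hM])
    · have : x % Ny ≠ 0 := by
        intro hc
        exact hnd (Int.dvd_of_emod_eq_zero hc)
      omega
    · have : x % Ny ≠ Ny - 1 := by
        intro hc
        exact hnd1 ⟨x / Ny, by linarith⟩
      omega
    · linarith
  · rintro ⟨i, ⟨hi1, hi2⟩, j, ⟨hj1, hj2⟩, rfl⟩
    have hNy3 : 3 ≤ Ny := by omega
    have hiNy : 1 * Ny ≤ i * Ny := mul_le_mul_of_nonneg_right hi1 (by omega)
    have hiNy2 : (i + 1) * Ny ≤ (Nx - 1) * Ny :=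
      mul_le_mul_of_nonneg_right (by omega) (by omega)
    have hxM : i * Ny + j < (Nx - 1) * Ny := by nlinarith
    have hxN : i * Ny + j < Nx * Ny := by nlinarith
    refine ⟨⟨by nlinarith, hxN⟩, ?_, ?_, ?_, ?_⟩
    · rintro ⟨-, -, t, ht⟩
      have h5 : j + 1 = Ny * (t - i + 1) := by linear_combination ht
      have := Int.le_of_dvd (show (0:Int) < j + 1 by omega) ⟨t - i + 1, h5⟩
      omega
    · rintro ⟨hc, -⟩
      omega
    · rintro ⟨-, -, t, ht⟩
      have h5 : j = Ny * (t - i) := by linear_combination ht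
      have := Int.le_of_dvd (show (0:Int) < j by omega) ⟨t - i, h5⟩
      omega
    · rintro ⟨-, hlt⟩
      have : min Ny (Nx * Ny) ≤ Ny := min_le_left _ _
      nlinarith

-- B's existence guard is harmless: without it the nested ranges are empty anyway
theorem guard_eq (Nx Ny : Int) :
    (if 2 < Nx ∧ 2 < Ny then
        (PySem.List.pyRange 1 (Nx - 1) 1).flatMap
          (fun i => (PySem.List.pyRange 1 (Ny - 1) 1).map (fun j => i * Ny + j))
      else []) =
    (PySem.List.pyRange 1 (Nx - 1) 1).flatMap
      (fun i => (PySem.List.pyRange 1 (Ny - 1) 1).map (fun j => i * Ny + j)) := by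
  split_ifs with h
  · rfl
  · rcases not_and_or.mp h with h | h
    · rw [PySem.List.pyRange_one_eq_nil (show Nx - 1 ≤ 1 by omega)]
      simp
    · rw [PySem.List.pyRange_one_eq_nil (show Ny - 1 ≤ 1 by omega)]
      simp

-- A's filtered interior equals B's coordinate-generated interior, for any 0 < Nx, 0 < Ny
theorem interior_eq (Nx Ny : Int) (hNx : 0 < Nx) (hNy : 0 < Ny) :
    (((((PySem.List.pyRange 0 (Nx * Ny) 1).filter
          (fun x => !(((PySem.List.slice? (PySem.List.pyRange 0 (Nx * Ny) 1) (some (Ny - 1)) none Ny).getD []).contains x))).filter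
          (fun x => !((PySem.List.slice (PySem.List.pyRange 0 (Nx * Ny) 1) (some ((Nx - 1) * Ny)) none).contains x))).filter
          (fun x => !(((PySem.List.slice? (PySem.List.pyRange 0 (Nx * Ny) 1) (some 0) none Ny).getD []).contains x))).filter
          (fun x => !((PySem.List.slice (PySem.List.pyRange 0 (Nx * Ny) 1) (some 0) (some Ny)).contains x)))
      = (PySem.List.pyRange 1 (Nx - 1) 1).flatMap
          (fun i => (PySem.List.pyRange 1 (Ny - 1) 1).map (fun j => i * Ny + j)) := by
  apply List.Perm.eq_of_pairwise (le := fun a b : Int => a < b)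
  · intro a b _ _ hab hba; omega
  · refine List.Pairwise.sublist ?_ (PySem.List.pairwise_lt_pyRange_one 0 (Nx * Ny))
    exact List.filter_sublist.trans
      (List.filter_sublist.trans (List.filter_sublist.trans List.filter_sublist))
  · rw [List.pairwise_flatMap]
    constructor
    · intro i _
      exact List.Pairwise.map _ (fun a b h => by omega)
        (PySem.List.pairwise_lt_pyRange_one 1 (Ny - 1))
    · refine (PySem.List.pairwise_lt_pyRange_one 1 (Nx - 1)).imp ?_
      intro i1 i2 h12 x hx y hy
      simp only [List.mem_map, PySem.List.mem_pyRange_one] at hx hy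
      obtain ⟨j1, hj1, rfl⟩ := hx
      obtain ⟨j2, hj2, rfl⟩ := hy
      have : (i1 + 1) * Ny ≤ i2 * Ny :=
        mul_le_mul_of_nonneg_right (by omega) (by omega)
      nlinarith
  · apply (List.perm_ext_iff_of_nodup ?_ ?_).mpr
    · intro x
      have hb1 := mem_slice_step (Nx * Ny) (Ny - 1) Ny x hNy (by omega)
      have hb22 := mem_slice_step (Nx * Ny) 0 Ny x hNy le_rfl
      have hb21 : x ∈ PySem.List.slice (PySem.List.pyRange 0 (Nx * Ny) 1) (some ((Nx - 1) * Ny)) none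
          ↔ (Nx - 1) * Ny ≤ x ∧ x < Nx * Ny := by
        rw [PySem.List.slice_from _ (mul_nonneg (by omega) (by omega)),
          mem_drop_pyRange _ _ _ (mul_nonneg (by omega) (by omega))]
      have hb23 : x ∈ PySem.List.slice (PySem.List.pyRange 0 (Nx * Ny) 1) (some 0) (some Ny)
          ↔ 0 ≤ x ∧ x < min Ny (Nx * Ny) := by
        rw [PySem.List.slice_zero_start, PySem.List.slice_to _ (by omega),
          mem_take_pyRange _ _ _ (by omega)]
      simp only [List.mem_filter, List.mem_flatMap, List.mem_map,
        PySem.List.mem_pyRange_one, Bool.not_eq_eq_eq_not, Bool.not_true,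
        List.contains_eq_mem, decide_eq_false_iff_not]
      rw [hb1, hb21, hb22, hb23]
      constructor
      · rintro ⟨⟨⟨⟨hx, h1⟩, h2⟩, h3⟩, h4⟩
        obtain ⟨i, hi, j, hj, rfl⟩ :=
          (interior_mem_iff Nx Ny x (by omega) (by omega)).mp
            ⟨hx, h1, h2, by simpa using h3, h4⟩
        exact ⟨i, hi, j, hj, rfl⟩
      · rintro ⟨i, hi, j, hj, rfl⟩
        obtain ⟨hx, h1, h2, h3, h4⟩ :=
          (interior_mem_iff Nx Ny (i * Ny + j) (by omega) (by omega)).mpr ⟨i, hi, j, hj, rfl⟩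
        exact ⟨⟨⟨⟨hx, h1⟩, h2⟩, by simpa using h3⟩, h4⟩
    · exact (List.Pairwise.sublist
        (List.filter_sublist.trans
          (List.filter_sublist.trans (List.filter_sublist.trans List.filter_sublist)))
        (PySem.List.pairwise_lt_pyRange_one 0 (Nx * Ny))).imp ne_of_lt
    · refine (List.pairwise_flatMap.mpr ⟨?_, ?_⟩).imp ne_of_lt
      · intro i _
        exact List.Pairwise.map _ (fun a b h => by omega)
          (PySem.List.pairwise_lt_pyRange_one 1 (Ny - 1))
      · refine (PySem.List.pairwise_lt_pyRange_one 1 (Nx - 1)).imp ?_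
        intro i1 i2 h12 x hx y hy
        simp only [List.mem_map, PySem.List.mem_pyRange_one] at hx hy
        obtain ⟨j1, hj1, rfl⟩ := hx
        obtain ⟨j2, hj2, rfl⟩ := hy
        have : (i1 + 1) * Ny ≤ i2 * Ny :=
          mul_le_mul_of_nonneg_right (by omega) (by omega)
        nlinarith

-- inside D_ (and for Ny = 0 masks nothing): xs[0::st] with a negative step on range(N), N ≥ 1, is [0]
theorem slice0_neg_eq (N st : Int) (hst : st < 0) (hN : 0 < N) :
    (PySem.List.slice? (PySem.List.pyRange 0 N 1) (some 0) none st).getD [] = [(0:Int)] := by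
  have hst0 : st ≠ 0 := by omega
  have h00 : ¬ (0:Int) < 0 := by omega
  simp only [PySem.List.slice?, PySem.List.sliceIndices, if_neg hst0, if_pos hst,
    Option.getD_some, PySem.List.length_pyRange_one, if_neg h00, sub_zero]
  have hm : min (0:Int) (↑N.toNat - 1) = 0 := min_eq_left (by omega)
  rw [hm, if_neg (by omega : ¬ (0:Int) < st), if_pos (by omega : (-1:Int) < 0)]
  have hdiv : ((0 - -1 + -st - 1) / -st) = 1 := by
    have : (0 - -1 + -st - 1) = -st := by ring
    rw [this, Int.ediv_self (by omega)]
  rw [hdiv]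
  norm_num [List.range_succ]
  simp [show (0:Int) < N by omega]

-- an empty index list makes every stepped slice of it empty
theorem slice?_nil_getD' (a : Int) (st : Int) :
    (PySem.List.slice? ([] : List Int) (some a) none st).getD [] = [] := by
  by_cases hst : st = 0
  · simp [PySem.List.slice?, hst]
  · simp [PySem.List.slice?, hst]

-- ===== VERDICT (by name: the statements are the Claim_ definitions above) =====
theorem get_inter_2d_inx_spec : Claim_unchanged_get_inter_2d_inx := by
  intro Nx Ny _ hPre hND
  show get_inter_2d_inx Nx Ny = get_inter_2d_inx_alt Nx Ny
  by_cases hpos : 0 < Nx ∧ 0 < Ny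
  · obtain ⟨hNx, hNy⟩ := hpos
    simp only [get_inter_2d_inx, get_inter_2d_inx_alt, if_pos (⟨hNx, hNy⟩ : 0 < Nx ∧ 0 < Ny),
      Prod.mk.injEq]
    have hNyN : Ny ≤ Nx * Ny := by nlinarith
    refine ⟨?_, ?_, ?_, ?_, ?_⟩
    · rw [slice_step_eq Nx Ny (Ny - 1) hNx hNy (by omega) (by omega)]
      exact List.map_congr_left (fun i _ => by ring)
    · exact drop_pyRange_eq (Nx * Ny) ((Nx - 1) * Ny)
        (mul_nonneg (by omega) (by omega)) (by nlinarith)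
    · rw [slice_step_eq Nx Ny 0 hNx hNy le_rfl (by omega)]
      exact List.map_congr_left (fun i _ => by ring)
    · exact take_pyRange_eq (Nx * Ny) Ny (by omega) hNyN
    · rw [guard_eq]
      exact interior_eq Nx Ny hNx hNy
  · -- Nx ≤ 0 < Ny or Nx ≥ 0 > Ny (Ny ≠ 0, and not both negative): the grid is empty
    have hD' : ¬ (Nx < 0 ∧ Ny < 0) := fun h => hND h
    have hN0 : Nx * Ny ≤ 0 := by
      rcases lt_or_gt_of_ne hPre with hy | hy
      · have hx : 0 ≤ Nx := by
          by_contra hc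
          exact hD' ⟨by omega, hy⟩
        nlinarith
      · have hx : Nx ≤ 0 := by
          by_contra hc
          exact hpos ⟨by omega, hy⟩
        nlinarith
    have hL : PySem.List.pyRange 0 (Nx * Ny) 1 = [] := PySem.List.pyRange_one_eq_nil hN0
    simp only [get_inter_2d_inx, get_inter_2d_inx_alt, if_neg hpos, hL,
      slice?_nil_getD', List.filter_nil, Prod.mk.injEq]
    refine ⟨trivial, ?_, trivial, ?_, trivial⟩
    · simp [PySem.List.slice]
    · simp [PySem.List.slice]

theorem get_inter_2d_inx_tight : Claim_exact_get_inter_2d_inx := by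
  intro Nx Ny _ _ hD heq
  obtain ⟨hNx, hNy⟩ := hD
  have hN : 0 < Nx * Ny := mul_pos_of_neg_of_neg hNx hNy
  have h3 := congrArg (fun t : List Int × List Int × List Int × List Int × List Int => t.2.2.1) heq
  simp only [get_inter_2d_inx, get_inter_2d_inx_alt,
    if_neg (show ¬ (0 < Nx ∧ 0 < Ny) by omega)] at h3
  rw [slice0_neg_eq (Nx * Ny) Ny hNy hN] at h3
  simp at h3

theorem get_inter_2d_inx_changed : Claim_changed_get_inter_2d_inx := by
  unfold Claim_changed_get_inter_2d_inx
  exact ⟨by decide, by decide, by decide, by decide, by decide, by decide⟩
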